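-- pv_equiv track=rewrite | github.com/mengxf33/CSCI544_Project_group54 | adaboost.py | cal_tag_matrix
-- ===== SOURCE A (Python) =====
-- def cal_tag_matrix(tag_select, tag):
--     tag_matrix = []
--     words_list = []
--     for temp in tag:
--         words_list.append(temp.split())
--     for tags in tag_select:
--         tag_tem = []
--         for i in range(len(tag)):
--             if tags in words_list[i]:
--                 tag_tem.append(1)
--             else:
--                 tag_tem.append(-1)
--         tag_matrix.append(tag_tem)
--     return tag_matrix
-- ===== SOURCE B (Python) =====
-- def cal_tag_matrix(tag_select, tag):
--     # Scatter instead of gather: index each selected tag to its row positions,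
--     # pre-fill the matrix with -1, then for each tag string write 1s into the
--     # rows of its words.
--     index = {}
--     for r, s in enumerate(tag_select):
--         index.setdefault(s, []).append(r)
--     m = [[-1] * len(tag) for _ in tag_select]
--     for j, t in enumerate(tag):
--         for w in t.split():
--             for r in index.get(w, []):
--                 m[r][j] = 1
--     return m
-- ===== Notes on version B (the rewrite author's own statement) =====
-- stated objective: faster
-- what changed: B replaces A's per-cell linear membership scan (gather) with a scatter: build a dict mapping each selected tag to its row positions once, pre-fill the matrix with -1, then walk each tag string's words and write 1s into the indexed rows.
import Mathlib
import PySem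

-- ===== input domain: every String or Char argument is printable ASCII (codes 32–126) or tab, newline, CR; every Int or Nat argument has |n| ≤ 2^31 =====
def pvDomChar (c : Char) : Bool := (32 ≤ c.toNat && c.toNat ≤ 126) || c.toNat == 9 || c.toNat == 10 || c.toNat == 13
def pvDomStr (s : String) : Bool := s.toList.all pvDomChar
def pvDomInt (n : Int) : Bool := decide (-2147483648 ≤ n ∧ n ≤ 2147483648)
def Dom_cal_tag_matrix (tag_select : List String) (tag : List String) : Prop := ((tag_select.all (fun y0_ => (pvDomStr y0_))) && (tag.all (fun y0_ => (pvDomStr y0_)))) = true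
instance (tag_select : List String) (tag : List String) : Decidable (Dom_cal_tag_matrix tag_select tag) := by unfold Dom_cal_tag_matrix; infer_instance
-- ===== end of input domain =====

-- B scatters: a dict indexes each selected tag to its row positions, the matrix starts all -1, and each tag string's words write 1s into their rows; A gathers cell by cell with a linear word-list scan.

-- ===== PORT A =====
def cal_tag_matrix (tag_select : List String) (tag : List String) : List (List Int) :=
  let words_list := tag.foldl (fun acc temp => acc ++ [PySem.Str.split₀ temp]) []
  tag_select.foldl (fun tag_matrix tags =>
    tag_matrix ++ [(PySem.List.pyRange 0 tag.length 1).foldl (fun tag_tem i =>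
      -- words_list[i]: i is always in range; the default [] is unreachable
      if (PySem.List.pyGetD words_list i []).contains tags then tag_tem ++ [(1 : Int)]
      else tag_tem ++ [(-1 : Int)]) []]) []

-- ===== PORT B =====
-- index = {}; for r, s in enumerate(tag_select): index.setdefault(s, []).append(r)
def pvIndexB (tag_select : List String) : PySem.Dict String (List Int) :=
  (PySem.List.enumerate tag_select).foldl
    (fun d p => d.insert p.2 (d.getD p.2 [] ++ [p.1])) (PySem.Dict.mk [])

def cal_tag_matrix_alt (tag_select : List String) (tag : List String) : List (List Int) :=
  let index := pvIndexB tag_select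
  let m0 := tag_select.map (fun _ => List.replicate tag.length (-1 : Int))
  (PySem.List.enumerate tag).foldl (fun m p =>
    (PySem.Str.split₀ p.2).foldl (fun m w =>
      (index.getD w []).foldl (fun m r =>
        -- m[r][j] = 1: r and j come from enumerate, so they are ≥ 0 and toNat is exact
        m.set r.toNat ((m.getD r.toNat []).set p.1.toNat (1 : Int))) m) m) m0

-- ===== PRECONDITION & SPEC =====
def Spec_cal_tag_matrix (tag_select : List String) (tag : List String) (out : List (List Int)) : Prop := out = cal_tag_matrix_alt tag_select tag
instance (tag_select : List String) (tag : List String) (out : List (List Int)) : Decidable (Spec_cal_tag_matrix tag_select tag out) := by unfold Spec_cal_tag_matrix; infer_instance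

-- ===== CLAIM (what is proved, stated in full; the proofs are below) =====
def Claim_equal_cal_tag_matrix : Prop := ∀ (tag_select : List String) (tag : List String), Dom_cal_tag_matrix tag_select tag → Spec_cal_tag_matrix tag_select tag (cal_tag_matrix tag_select tag)

-- ===== LEMMAS AND PROOFS =====

-- the common normal form: entry (r, c) = 1 iff tag_select[r] is a word of tag[c]
def pvM (tag_select : List String) (tag : List String) : List (List Int) :=
  tag_select.map (fun s => tag.map (fun t =>
    if (PySem.Str.split₀ t).contains s then (1 : Int) else -1))

lemma foldl_append_if_else {α β : Type} (p : α → Bool) (f g : α → β) (l : List α) (acc : List β) :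
    l.foldl (fun r x => if p x then r ++ [f x] else r ++ [g x]) acc
      = acc ++ l.map (fun x => if p x then f x else g x) := by
  induction l generalizing acc with
  | nil => simp
  | cons x xs ih => by_cases h : p x <;> simp [h, ih]

lemma cal_tag_matrix_eq_pvM (tag_select tag : List String) :
    cal_tag_matrix tag_select tag = pvM tag_select tag := by
  unfold cal_tag_matrix pvM
  simp only [PySem.List.foldl_append_singleton_eq_map, List.nil_append]
  refine List.map_congr_left (fun s _ => ?_)
  have hlen : (tag.length : Int) = ((tag.map PySem.Str.split₀).length : Int) := by simp
  rw [hlen, PySem.List.foldl_pyRange_zero_pyGetD' (tag.map PySem.Str.split₀) ([] : List String)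
      (fun (r : List Int) (w : List String) => if w.contains s then r ++ [(1:Int)] else r ++ [(-1:Int)]) []]
  rw [List.foldl_map, foldl_append_if_else]
  simp

-- matrix entry with out-of-range default 0
def pvEnt (m : List (List Int)) (r c : Nat) : Int := (m.getD r []).getD c 0

-- the index dict maps w to the (cast) positions of w in tag_select, in order
lemma foldl_index_getD (l : List (Int × String)) (d : PySem.Dict String (List Int)) (w : String) :
    (l.foldl (fun d p => d.insert p.2 (d.getD p.2 [] ++ [p.1])) d).getD w [] =
      d.getD w [] ++ (l.filter (fun p => p.2 == w)).map (fun p => p.1) := by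
  induction l generalizing d with
  | nil => simp
  | cons p l ih =>
    simp only [List.foldl_cons, ih, List.filter_cons]
    rw [PySem.Dict.getD_insert]
    by_cases h : p.2 = w
    · simp [h]
    · have h' : (p.2 == w) = false := by simp [h]
      simp [h', Ne.symm h]

lemma pvIndexB_getD (ts : List String) (w : String) :
    (pvIndexB ts).getD w [] =
      ((PySem.List.enumerate ts).filter (fun p => p.2 == w)).map (fun p => p.1) := by
  unfold pvIndexB
  rw [foldl_index_getD]
  simp [PySem.Dict.getD, PySem.Dict.get?]

lemma mem_pvIndexB (ts : List String) (w : String) (x : Int) :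
    x ∈ (pvIndexB ts).getD w [] ↔ ∃ (k : Nat) (_ : k < ts.length), x = (k : Int) ∧ ts[k] = w := by
  rw [pvIndexB_getD]
  simp only [List.mem_map, List.mem_filter, PySem.List.mem_enumerate_iff]
  constructor
  · rintro ⟨p, ⟨⟨k, hk, rfl⟩, hw⟩, rfl⟩
    refine ⟨k, hk, by simp, by simpa using hw⟩
  · rintro ⟨k, hk, rfl, hw⟩
    exact ⟨(0 + (k : Int), ts[k]), ⟨⟨k, hk, rfl⟩, by simpa using hw⟩, by simp⟩

lemma nonneg_pvIndexB (ts : List String) (w : String) :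
    ∀ x ∈ (pvIndexB ts).getD w [], 0 ≤ x := by
  intro x hx
  obtain ⟨k, _, rfl, _⟩ := (mem_pvIndexB ts w x).mp hx
  positivity

lemma natmem_pvIndexB (ts : List String) (w : String) (r : Nat) :
    ((r : Int) ∈ (pvIndexB ts).getD w []) ↔ (r < ts.length ∧ ts.getD r "" = w) := by
  rw [mem_pvIndexB]
  constructor
  · rintro ⟨k, hk, hkr, hw⟩
    have : k = r := by omega
    subst this
    exact ⟨hk, by rwa [List.getD_eq_getElem ts "" hk]⟩
  · rintro ⟨hr, hw⟩
    exact ⟨r, hr, rfl, by rwa [List.getD_eq_getElem ts "" hr] at hw⟩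

lemma getD_set_outer (m : List (List Int)) (a r : Nat) (v : List Int) :
    (m.set a v).getD r [] = if r = a ∧ a < m.length then v else m.getD r [] := by
  simp [List.getD_eq_getElem?_getD, List.getElem?_set]
  split_ifs with h1 h2 h3 <;> try simp_all

lemma getD_set_inner (l : List Int) (j c : Nat) :
    (l.set j 1).getD c 0 = if c = j ∧ j < l.length then 1 else l.getD c 0 := by
  simp [List.getD_eq_getElem?_getD, List.getElem?_set]
  split_ifs with h1 h2 h3 <;> try simp_all

-- one assignment m[a][j] = 1, entry-wise
lemma pvEnt_set (m : List (List Int)) (a j r c : Nat) :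
    pvEnt (m.set a ((m.getD a []).set j 1)) r c =
      if r = a ∧ c = j ∧ a < m.length ∧ j < (m.getD a []).length then 1 else pvEnt m r c := by
  unfold pvEnt
  rw [getD_set_outer]
  by_cases h1 : r = a ∧ a < m.length
  · obtain ⟨rfl, ha⟩ := h1
    rw [if_pos ⟨rfl, ha⟩, getD_set_inner]
    by_cases h2 : c = j ∧ j < (m.getD r []).length
    · rw [if_pos h2, if_pos ⟨rfl, h2.1, ha, h2.2⟩]
    · rw [if_neg h2, if_neg (by tauto)]
  · rw [if_neg h1, if_neg (by tauto)]

lemma length_set_row (m : List (List Int)) (a j : Nat) :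
    (m.set a ((m.getD a []).set j 1)).length = m.length := by simp

lemma rowlen_set_row (m : List (List Int)) (a j r : Nat) :
    ((m.set a ((m.getD a []).set j 1)).getD r []).length = ((m.getD r []).length) := by
  rw [getD_set_outer]
  by_cases h1 : r = a ∧ a < m.length
  · obtain ⟨rfl, ha⟩ := h1; rw [if_pos ⟨rfl, ha⟩]; simp
  · rw [if_neg h1]

-- innermost loop: for r in rs: m[r][j] = 1
def pvScat (j : Nat) (rs : List Int) (m : List (List Int)) : List (List Int) :=
  rs.foldl (fun m r => m.set r.toNat ((m.getD r.toNat []).set j 1)) m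

lemma pvScat_length (j : Nat) (rs : List Int) (m : List (List Int)) :
    (pvScat j rs m).length = m.length := by
  induction rs generalizing m with
  | nil => rfl
  | cons x rs ih => simp [pvScat, List.foldl_cons] at ih ⊢; rw [ih]; simp

lemma pvScat_rowlen (j : Nat) (rs : List Int) (m : List (List Int)) (r : Nat) :
    ((pvScat j rs m).getD r []).length = (m.getD r []).length := by
  induction rs generalizing m with
  | nil => rfl
  | cons x rs ih => simp only [pvScat, List.foldl_cons] at ih ⊢; rw [ih, rowlen_set_row]

lemma pvScat_ent (j : Nat) (rs : List Int) (m : List (List Int)) (r c : Nat)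
    (hnn : ∀ x ∈ rs, 0 ≤ x) :
    pvEnt (pvScat j rs m) r c =
      if (r : Int) ∈ rs ∧ c = j ∧ r < m.length ∧ j < (m.getD r []).length then 1
      else pvEnt m r c := by
  induction rs generalizing m with
  | nil => simp [pvScat]
  | cons x rs ih =>
    have hx : 0 ≤ x := hnn x (by simp)
    have hnn' : ∀ y ∈ rs, 0 ≤ y := fun y hy => hnn y (by simp [hy])
    have hstep : pvScat j (x :: rs) m
        = pvScat j rs (m.set x.toNat ((m.getD x.toNat []).set j 1)) := rfl
    rw [hstep, ih _ hnn', length_set_row, rowlen_set_row, pvEnt_set]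
    by_cases h0 : r = x.toNat
    · subst h0
      have hcast : ((x.toNat : Nat) : Int) = x := Int.toNat_of_nonneg hx
      simp only [hcast, List.mem_cons, true_or, true_and]
      by_cases hA : x ∈ rs ∧ c = j ∧ x.toNat < m.length ∧ j < (m.getD x.toNat []).length
      · rw [if_pos hA, if_pos hA.2]
      · rw [if_neg hA]
    · have hB : ¬(r = x.toNat ∧ c = j ∧ x.toNat < m.length ∧ j < (m.getD x.toNat []).length) :=
        fun h => h0 h.1
      rw [if_neg hB]
      have h0' : ¬((r : Int) = x) := by omega
      simp only [List.mem_cons, h0', false_or]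

-- middle loop: for w in ws: for r in index[w]: m[r][j] = 1
def pvCol (ts : List String) (j : Nat) (ws : List String) (m : List (List Int)) : List (List Int) :=
  ws.foldl (fun m w => pvScat j ((pvIndexB ts).getD w []) m) m

lemma pvCol_length (ts : List String) (j : Nat) (ws : List String) (m : List (List Int)) :
    (pvCol ts j ws m).length = m.length := by
  induction ws generalizing m with
  | nil => rfl
  | cons w ws ih => simp only [pvCol, List.foldl_cons] at ih ⊢; rw [ih, pvScat_length]

lemma pvCol_rowlen (ts : List String) (j : Nat) (ws : List String) (m : List (List Int)) (r : Nat) :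
    ((pvCol ts j ws m).getD r []).length = (m.getD r []).length := by
  induction ws generalizing m with
  | nil => rfl
  | cons w ws ih => simp only [pvCol, List.foldl_cons] at ih ⊢; rw [ih, pvScat_rowlen]

lemma pvCol_ent (ts : List String) (j : Nat) (ws : List String) (m : List (List Int)) (r c : Nat) :
    pvEnt (pvCol ts j ws m) r c =
      if (r < ts.length ∧ ts.getD r "" ∈ ws) ∧ c = j ∧ r < m.length ∧ j < (m.getD r []).length then 1
      else pvEnt m r c := by
  induction ws generalizing m with
  | nil => simp [pvCol]
  | cons w ws ih =>
    have hstep : pvCol ts j (w :: ws) m = pvCol ts j ws (pvScat j ((pvIndexB ts).getD w []) m) := rfl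
    rw [hstep, ih, pvScat_length, pvScat_rowlen,
        pvScat_ent j _ m r c (nonneg_pvIndexB ts w)]
    simp only [natmem_pvIndexB, List.mem_cons]
    split_ifs <;> tauto

-- outer loop over the enumerated tag strings
def pvOut (ts : List String) (l : List (Int × String)) (m : List (List Int)) : List (List Int) :=
  l.foldl (fun m p => pvCol ts p.1.toNat (PySem.Str.split₀ p.2) m) m

lemma pvOut_length (ts : List String) (l : List (Int × String)) (m : List (List Int)) :
    (pvOut ts l m).length = m.length := by
  induction l generalizing m with
  | nil => rfl
  | cons p l ih => simp only [pvOut, List.foldl_cons] at ih ⊢; rw [ih, pvCol_length]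

lemma pvOut_rowlen (ts : List String) (l : List (Int × String)) (m : List (List Int)) (r : Nat) :
    ((pvOut ts l m).getD r []).length = (m.getD r []).length := by
  induction l generalizing m with
  | nil => rfl
  | cons p l ih => simp only [pvOut, List.foldl_cons] at ih ⊢; rw [ih, pvCol_rowlen]

lemma pvOut_ent (ts : List String) (l : List (Int × String)) (m : List (List Int)) (r c : Nat) :
    pvEnt (pvOut ts l m) r c =
      if (∃ p ∈ l, p.1.toNat = c ∧ r < ts.length ∧ ts.getD r "" ∈ PySem.Str.split₀ p.2)
          ∧ r < m.length ∧ c < (m.getD r []).length then 1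
      else pvEnt m r c := by
  induction l generalizing m with
  | nil => simp [pvOut]
  | cons p l ih =>
    have hstep : pvOut ts (p :: l) m = pvOut ts l (pvCol ts p.1.toNat (PySem.Str.split₀ p.2) m) := rfl
    rw [hstep, ih, pvCol_length, pvCol_rowlen, pvCol_ent]
    by_cases h1 : (∃ q ∈ l, q.1.toNat = c ∧ r < ts.length ∧ ts.getD r "" ∈ PySem.Str.split₀ q.2)
        ∧ r < m.length ∧ c < (m.getD r []).length
    · obtain ⟨⟨q, hq, hqp⟩, hr, hc⟩ := h1
      rw [if_pos ⟨⟨q, hq, hqp⟩, hr, hc⟩, if_pos ⟨⟨q, List.mem_cons_of_mem _ hq, hqp⟩, hr, hc⟩]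
    · rw [if_neg h1]
      by_cases h2 : (r < ts.length ∧ ts.getD r "" ∈ PySem.Str.split₀ p.2)
          ∧ c = p.1.toNat ∧ r < m.length ∧ p.1.toNat < (m.getD r []).length
      · obtain ⟨hB1, hcj, hr, hj⟩ := h2
        rw [if_pos ⟨hB1, hcj, hr, hj⟩,
            if_pos ⟨⟨p, List.mem_cons_self, hcj.symm, hB1⟩, hr, by rw [hcj]; exact hj⟩]
      · rw [if_neg h2, if_neg]
        rintro ⟨⟨q, hq, hqc, hts, hmem⟩, hr, hc⟩
        rcases List.mem_cons.mp hq with rfl | hq'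
        · exact h2 ⟨⟨hts, hmem⟩, hqc.symm, hr, by rw [← hqc] at hc; exact hc⟩
        · exact h1 ⟨⟨q, hq', hqc, hts, hmem⟩, hr, hc⟩

lemma cal_tag_matrix_alt_eq_pvM (tag_select tag : List String) :
    cal_tag_matrix_alt tag_select tag = pvM tag_select tag := by
  have h0 : cal_tag_matrix_alt tag_select tag
      = pvOut tag_select (PySem.List.enumerate tag)
          (tag_select.map fun _ => List.replicate tag.length (-1)) := rfl
  rw [h0]
  have hm0len : (tag_select.map fun _ => List.replicate tag.length (-1 : Int)).length
      = tag_select.length := by simp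
  have hm0row : ∀ r : Nat, r < tag_select.length →
      ((tag_select.map fun _ => List.replicate tag.length (-1 : Int)).getD r [])
        = List.replicate tag.length (-1 : Int) := by
    intro r hr
    rw [List.getD_eq_getElem _ [] (by simpa using hr)]
    simp
  have hlen : (pvOut tag_select (PySem.List.enumerate tag)
      (tag_select.map fun _ => List.replicate tag.length (-1))).length = tag_select.length := by
    rw [pvOut_length, hm0len]
  apply List.ext_getElem
  · rw [hlen]; simp [pvM]
  · intro r h1 h2
    have hr : r < tag_select.length := by rwa [hlen] at h1
    have hrowlen : ((pvOut tag_select (PySem.List.enumerate tag)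
        (tag_select.map fun _ => List.replicate tag.length (-1))).getD r []).length
        = tag.length := by
      rw [pvOut_rowlen, hm0row r hr]; simp
    have hrowget : (pvOut tag_select (PySem.List.enumerate tag)
        (tag_select.map fun _ => List.replicate tag.length (-1)))[r]
        = (pvOut tag_select (PySem.List.enumerate tag)
            (tag_select.map fun _ => List.replicate tag.length (-1))).getD r [] :=
      (List.getD_eq_getElem _ [] h1).symm
    have hpvMr : (pvM tag_select tag)[r] = tag.map (fun t =>
        if (PySem.Str.split₀ t).contains (tag_select[r]) then (1 : Int) else -1) := by
      simp [pvM]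
    rw [hrowget, hpvMr]
    apply List.ext_getElem
    · rw [hrowlen]; simp
    · intro c hc1 hc2
      have hc : c < tag.length := by rwa [hrowlen] at hc1
      have hent : ((pvOut tag_select (PySem.List.enumerate tag)
          (tag_select.map fun _ => List.replicate tag.length (-1))).getD r [])[c]
          = pvEnt (pvOut tag_select (PySem.List.enumerate tag)
              (tag_select.map fun _ => List.replicate tag.length (-1))) r c := by
        unfold pvEnt
        rw [List.getD_eq_getElem _ (0 : Int) hc1]
      rw [hent, pvOut_ent]
      have hcond : (∃ p ∈ PySem.List.enumerate tag, p.1.toNat = c ∧ r < tag_select.length ∧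
          tag_select.getD r "" ∈ PySem.Str.split₀ p.2)
          ↔ tag_select[r] ∈ PySem.Str.split₀ (tag[c]) := by
        constructor
        · rintro ⟨p, hp, hpc, -, hmem⟩
          obtain ⟨k, hk, rfl⟩ := (PySem.List.mem_enumerate_iff tag 0 p).mp hp
          have hkc : k = c := by simp at hpc; omega
          subst hkc
          rwa [List.getD_eq_getElem _ "" hr] at hmem
        · intro hmem
          refine ⟨((c : Int), tag[c]), (PySem.List.mem_enumerate_iff tag 0 _).mpr ⟨c, hc, by simp⟩,
            by simp, hr, ?_⟩
          rwa [List.getD_eq_getElem _ "" hr]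
      by_cases hmem : tag_select[r] ∈ PySem.Str.split₀ (tag[c])
      · rw [if_pos ⟨hcond.mpr hmem, by rwa [hm0len], by rw [hm0row r hr]; simpa using hc⟩]
        simp [hmem]
      · rw [if_neg (fun h => hmem (hcond.mp h.1))]
        unfold pvEnt
        rw [hm0row r hr, List.getD_eq_getElem _ (0 : Int) (by simpa using hc)]
        simp [hmem]

-- ===== VERDICT (by name: the statement is the Claim_ definition above) =====
theorem cal_tag_matrix_spec : Claim_equal_cal_tag_matrix := by
  intro tag_select tag _
  unfold Spec_cal_tag_matrix
  rw [cal_tag_matrix_eq_pvM, cal_tag_matrix_alt_eq_pvM]
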